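-- pv_equiv track=rewrite | github.com/matfizinf/Algorytmy | Algorytmy na tekstach/Palindromy i anagramy/zad4.py | reg
-- ===== SOURCE A (Python) =====
-- def czy_palindrom2(s):
--     return ''.join(reversed(s)) == s
--
-- def reg(w):
--     if len(w) == 1:
--         return 1
--     else:
--         if not czy_palindrom2(w):
--             return 0
--         else:
--             w1 = w[:len(w)//2]
--             return reg(w1) + 1
-- ===== SOURCE B (Python) =====
-- def reg(w):
--     m = len(w)
--     count = 0
--     while m != 1:
--         if any(w[i] != w[m - 1 - i] for i in range(m // 2)):
--             return count
--         count += 1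
--         m //= 2
--     return count + 1
-- ===== Notes on version B (the rewrite author's own statement) =====
-- stated objective: alternative
-- what changed: Instead of recursing with string slicing and a reversed-join palindrome test, B keeps the original string untouched and iterates over shrinking prefix LENGTHS, testing each prefix for palindromicity by pairwise index comparisons (w[i] vs w[m-1-i]) with an explicit counter; no slices or reversed copies are ever built.
-- outside the precondition, e.g. on reg(''): A raises RecursionError, B does not finish within the time limit
import Mathlib
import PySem

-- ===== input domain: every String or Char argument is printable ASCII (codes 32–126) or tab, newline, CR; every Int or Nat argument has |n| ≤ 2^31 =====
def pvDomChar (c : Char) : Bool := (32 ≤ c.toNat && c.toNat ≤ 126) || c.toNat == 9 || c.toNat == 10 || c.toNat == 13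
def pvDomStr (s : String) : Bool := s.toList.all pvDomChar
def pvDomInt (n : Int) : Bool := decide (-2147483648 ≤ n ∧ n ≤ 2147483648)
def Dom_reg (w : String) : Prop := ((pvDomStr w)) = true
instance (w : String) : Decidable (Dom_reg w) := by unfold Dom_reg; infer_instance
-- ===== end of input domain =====

-- B iterates over shrinking prefix lengths of the untouched original string, testing palindromicity by index-pair comparisons with an explicit counter (alternative decomposition, same cost).


-- ===== PORT A =====
-- czy_palindrom2(s): ''.join(reversed(s)) == s  (exact on List Char)
def czyPalindrom2 (l : List Char) : Bool := l.reverse == l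

-- A's recursion over the character list; w[:len(w)//2] = take (len/2), exact since the
-- index is nonnegative.  The 'length = 0' branch is a totality guard only:
-- Python A recurses forever (RecursionError) there, outside Pre_reg.
def regA (l : List Char) : Int :=
  if l.length = 1 then 1
  else if h0 : l.length = 0 then 0
  else if ¬ czyPalindrom2 l then 0
  else regA (l.take (l.length / 2)) + 1
  termination_by l.length
  decreasing_by simp only [List.length_take]; omega

def reg (w : String) : Int := regA w.toList

-- ===== PORT B =====
-- any(w[i] != w[m-1-i] for i in range(m//2)): indices are always in range (i < m//2 and
-- m-1-i < m ≤ len w), so getD with a dummy default is exact Python indexing here.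
def mismatch (l : List Char) (m : Nat) : Bool :=
  (List.range (m / 2)).any (fun i => l.getD i ' ' != l.getD (m - 1 - i) ' ')

-- B's while-loop over the prefix length m with counter c, as tail recursion.
-- The 'm = 0' branch is a totality guard only: Python B loops forever there, outside Pre_reg.
def regLoop (l : List Char) (m : Nat) (c : Int) : Int :=
  if m = 1 then c + 1
  else if mismatch l m then c
  else if m = 0 then c
  else regLoop l (m / 2) (c + 1)
  termination_by m
  decreasing_by omega

def reg_alt (w : String) : Int := regLoop w.toList w.toList.length 0

-- ===== PRECONDITION & SPEC =====
-- Pre_ excludes only the empty string, on which A raises RecursionError (and B loops forever).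
def Pre_reg (w : String) : Prop := w ≠ ""
instance (w : String) : Decidable (Pre_reg w) := by unfold Pre_reg; infer_instance
def pvWitness_reg : String := "abba"

def Spec_reg (w : String) (out : Int) : Prop := out = reg_alt w
instance (w : String) (out : Int) : Decidable (Spec_reg w out) := by unfold Spec_reg; infer_instance

-- ===== CLAIM =====
def Claim_equal_reg : Prop := ∀ (w : String), Dom_reg w → Pre_reg w → Spec_reg w (reg w)

-- ===== LEMMAS AND PROOFS =====
theorem getD_reverse_char (l : List Char) (i : Nat) (h : i < l.length) :
    l.reverse.getD i ' ' = l.getD (l.length - 1 - i) ' ' := by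
  rw [List.getD_eq_getElem _ _ (by simpa using h), List.getD_eq_getElem _ _ (by omega),
    List.getElem_reverse]

theorem getD_take_char (l : List Char) (m i : Nat) (hm : m ≤ l.length) (hi : i < m) :
    (l.take m).getD i ' ' = l.getD i ' ' := by
  rw [List.getD_eq_getElem _ _ (by simp; omega), List.getD_eq_getElem _ _ (by omega),
    List.getElem_take]

-- B's index-pair test on the length-m prefix agrees with A's reverse-equality test on it.
theorem mismatch_iff_pal (l : List Char) (m : Nat) (hm : m ≤ l.length) :
    mismatch l m = false ↔ (l.take m).reverse = l.take m := by
  have hlp : (l.take m).length = m := by simp; omega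
  constructor
  · intro h
    have hpair : ∀ i, i < m / 2 → l.getD i ' ' = l.getD (m - 1 - i) ' ' := by
      intro i hi
      have hh := List.any_eq_false.mp h i (List.mem_range.mpr hi)
      simpa using hh
    have key : ∀ i, i < m → l.getD (m - 1 - i) ' ' = l.getD i ' ' := by
      intro i hi
      by_cases hhalf : i < m / 2
      · exact (hpair i hhalf).symm
      · by_cases hmid : m - 1 - i = i
        · rw [hmid]
        · have hlt : m - 1 - i < m / 2 := by omega
          have := hpair (m - 1 - i) hlt
          rwa [show m - 1 - (m - 1 - i) = i from by omega] at this
    apply List.ext_getElem (by simp)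
    intro j h1 h2
    have hjm : j < m := by rw [hlp] at h2; exact h2
    rw [← List.getD_eq_getElem _ ' ', ← List.getD_eq_getElem _ ' ',
      getD_reverse_char _ _ (by omega), hlp,
      getD_take_char l m _ hm (by omega), getD_take_char l m j hm hjm]
    exact key j hjm
  · intro h
    apply List.any_eq_false.mpr
    intro i hi
    have hi2 : i < m / 2 := List.mem_range.mp hi
    have hgj := congrArg (fun t => t.getD i ' ') h
    simp only at hgj
    rw [getD_reverse_char _ _ (by omega), hlp,
      getD_take_char l m _ hm (by omega), getD_take_char l m i hm (by omega)] at hgj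
    simp only [bne_iff_ne, ne_eq, not_not]
    exact hgj.symm

-- loop invariant: B's length-driven loop computes A's value on the length-m prefix, plus the counter
theorem regLoop_eq_regA (n : Nat) : ∀ (m : Nat) (l : List Char) (c : Int),
    m ≤ n → m ≤ l.length → m ≠ 0 → regLoop l m c = regA (l.take m) + c := by
  induction n with
  | zero => intro m l c hn _ hm0; omega
  | succ n ih =>
    intro m l c hn hm hm0
    rw [regLoop, regA]
    have hlt : (l.take m).length = m := by simp; omega
    by_cases h1 : m = 1
    · rw [if_pos h1, if_pos (hlt.trans h1)]; ring
    · simp only [hlt, h1, if_false, dif_neg hm0]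
      by_cases hmis : mismatch l m
      · have hnp : ¬ (l.take m).reverse = l.take m := by
          intro hp; rw [← mismatch_iff_pal l m hm] at hp; simp [hmis] at hp
        have hcz : ¬ czyPalindrom2 (l.take m) := by simpa [czyPalindrom2] using hnp
        simp [hmis, hcz]
      · simp only [Bool.not_eq_true] at hmis
        have hp : (l.take m).reverse = l.take m := (mismatch_iff_pal l m hm).mp hmis
        have hcz : czyPalindrom2 (l.take m) = true := by simpa [czyPalindrom2] using hp
        simp only [hmis, Bool.false_eq_true, if_false, if_neg hm0, hcz, not_true_eq_false]
        rw [List.take_take, show min (m / 2) m = m / 2 from by omega,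
          ih (m / 2) l (c + 1) (by omega) (by omega) (by omega)]
        ring

-- ===== VERDICT =====
theorem reg_spec : Claim_equal_reg := by
  intro w _ hpre
  unfold Spec_reg reg reg_alt
  have hne : w.toList ≠ [] := fun h => hpre (String.toList_eq_nil_iff.mp h)
  have hlen : w.toList.length ≠ 0 := by simpa using hne
  rw [regLoop_eq_regA w.toList.length w.toList.length w.toList 0 le_rfl le_rfl hlen,
      List.take_length]
  ring
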